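-- pv_equiv track=rewrite | github.com/ChoiwahChow/p9m4 | utils/mace4/cube_analyzer.py | ordering_cells_2
-- ===== SOURCE A (Python) =====
-- def ordering_cells_2(length):
-- 	""" ordering: diagonal first, then minimum row, then minimum column,
-- 	  then next minimum row, then next minimum column ...
-- 	  e.g. (0, 0), (1, 1), (0, 1), (1, 0), (2, 2), (0, 2), (2, 0), (1, 2), (2, 1), (3, 3)...
-- 	Args:
-- 		length (int): maximum depth of the search search, note count starts from 0,
-- 						 so a max depth of 2 is 0 and 1.
-- 	"""
-- 	seq = list()
-- 	d = 0
-- 	while len(seq) < length: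
-- 		seq.append((d, d))
-- 		if len(seq) >= length:
-- 			return seq
-- 		for x in range(0, d):
-- 			seq.append((x, d))
-- 			if len(seq) >= length:
-- 				return seq
-- 			seq.append((d, x))
-- 			if len(seq) >= length:
-- 				return seq
-- 		d += 1
-- 	return tuple(seq)
-- ===== SOURCE B (Python) =====
-- def ordering_cells_2(length):
--     """Map each index i directly to its cell: block d covers indices
--     [d*d, (d+1)*(d+1)); offset 0 is the diagonal, odd offsets are row
--     cells, even offsets column cells."""
--     if length <= 0:
--         return ()
--     out = []
--     d = 0
--     for i in range(length):
--         if i == (d + 1) * (d + 1):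
--             d += 1
--         o = i - d * d
--         if o == 0:
--             out.append((d, d))
--         elif o % 2:
--             out.append(((o - 1) // 2, d))
--         else:
--             out.append((d, o // 2 - 1))
--     return out
-- ===== Notes on version B (the rewrite author's own statement) =====
-- stated objective: alternative
-- what changed: Replaces A's while-loop that grows the block-by-block sequence with early-return length checks by a single pass over indices 0..length-1 that maps each index i directly to its cell via the block identity (block d spans [d*d,(d+1)*(d+1)]) and offset parity.
import Mathlib
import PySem

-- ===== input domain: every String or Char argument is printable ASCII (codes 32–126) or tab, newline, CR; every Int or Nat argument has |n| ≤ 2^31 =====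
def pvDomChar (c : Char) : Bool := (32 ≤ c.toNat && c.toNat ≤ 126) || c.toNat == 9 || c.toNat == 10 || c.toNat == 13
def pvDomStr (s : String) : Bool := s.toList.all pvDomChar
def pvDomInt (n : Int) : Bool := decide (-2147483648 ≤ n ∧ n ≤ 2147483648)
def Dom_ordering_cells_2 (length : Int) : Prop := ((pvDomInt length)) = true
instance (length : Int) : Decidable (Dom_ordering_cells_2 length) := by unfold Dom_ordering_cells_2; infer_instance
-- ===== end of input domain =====

-- B replaces A's block-growing while loop (with early-return length checks) by a single
-- pass that maps each index i of range(length) directly to its cell; objective: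
-- alternative decomposition, same cost. A returns the empty TUPLE for length <= 0 and a
-- list otherwise; both map to [] under the type convention.

-- ===== PORT A =====
-- the inner 'for x in range(0, d)' loop; .inl = early 'return seq', .inr = loop finished
def ordering_cells_2_for (length : Int) (d : Int) :
    List Int → List (Int × Int) → (List (Int × Int)) ⊕ (List (Int × Int))
  | [], seq => .inr seq
  | x :: rest, seq =>
    let seq1 := seq ++ [(x, d)]
    if length ≤ (seq1.length : Int) then .inl seq1
    else
      let seq2 := seq1 ++ [(d, x)]
      if length ≤ (seq2.length : Int) then .inl seq2
      else ordering_cells_2_for length d rest seq2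

-- the 'while len(seq) < length' loop; fuel is only a totality guard (each iteration
-- grows seq, and length.toNat iterations always suffice — proved in pvGoA_spec below)
def ordering_cells_2_go (fuel : Nat) (length : Int) (seq : List (Int × Int)) (d : Int) :
    List (Int × Int) :=
  match fuel with
  | 0 => seq
  | fuel + 1 =>
    if (seq.length : Int) < length then
      let seq1 := seq ++ [(d, d)]
      if length ≤ (seq1.length : Int) then seq1
      else
        match ordering_cells_2_for length d (PySem.List.pyRange 0 d 1) seq1 with
        | .inl s => s
        | .inr s => ordering_cells_2_go fuel length s (d + 1)
    else seq

def ordering_cells_2 (length : Int) : List (Int × Int) :=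
  ordering_cells_2_go length.toNat length [] 0

-- ===== PORT B =====
-- body of 'for i in range(length)': state is (out, d)
def ordering_cells_2_step (st : List (Int × Int) × Int) (i : Int) :
    List (Int × Int) × Int :=
  let d := if i = (st.2 + 1) * (st.2 + 1) then st.2 + 1 else st.2
  let o := i - d * d
  let out :=
    if o = 0 then st.1 ++ [(d, d)]
    else if PySem.Int.mod o 2 ≠ 0 then st.1 ++ [(PySem.Int.floordiv (o - 1) 2, d)]
    else st.1 ++ [(d, PySem.Int.floordiv o 2 - 1)]
  (out, d)

def ordering_cells_2_alt (length : Int) : List (Int × Int) :=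
  if length ≤ 0 then []
  else ((PySem.List.pyRange 0 length 1).foldl ordering_cells_2_step ([], 0)).1

-- ===== PRECONDITION & SPEC =====
def Spec_ordering_cells_2 (length : Int) (out : List (Int × Int)) : Prop := out = ordering_cells_2_alt length
instance (length : Int) (out : List (Int × Int)) : Decidable (Spec_ordering_cells_2 length out) := by unfold Spec_ordering_cells_2; infer_instance

-- ===== CLAIM (what is proved, stated in full; the proofs are below) =====
def Claim_equal_ordering_cells_2 : Prop := ∀ (length : Int), Dom_ordering_cells_2 length → Spec_ordering_cells_2 length (ordering_cells_2 length)

-- ===== LEMMAS AND PROOFS =====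

-- the closed-form cell at index n (common characterisation of both ports)
def pvCell (n : Nat) : Int × Int :=
  if n - Nat.sqrt n * Nat.sqrt n = 0 then ((Nat.sqrt n : Int), (Nat.sqrt n : Int))
  else if (n - Nat.sqrt n * Nat.sqrt n) % 2 = 1 then
    (((n - Nat.sqrt n * Nat.sqrt n - 1) / 2 : Nat), (Nat.sqrt n : Int))
  else ((Nat.sqrt n : Int), (((n - Nat.sqrt n * Nat.sqrt n) / 2 - 1 : Nat) : Int))

theorem pv_sqrt_between (d i : Nat) (h1 : d * d ≤ i) (h2 : i < (d + 1) * (d + 1)) :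
    Nat.sqrt i = d := by
  have ha : d ≤ Nat.sqrt i := Nat.le_sqrt.mpr h1
  have hb : Nat.sqrt i < d + 1 := Nat.sqrt_lt.mpr h2
  omega

theorem pvCell_sq (d : Nat) : pvCell (d * d) = ((d : Int), (d : Int)) := by
  have hs : Nat.sqrt (d * d) = d := pv_sqrt_between d _ (le_refl _) (by nlinarith)
  unfold pvCell
  rw [hs]
  simp

theorem pvCell_odd (d x : Nat) (h : x < d) :
    pvCell (d * d + 2 * x + 1) = ((x : Int), (d : Int)) := by
  have hs : Nat.sqrt (d * d + 2 * x + 1) = d := pv_sqrt_between d _ (by omega) (by nlinarith)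
  unfold pvCell
  rw [hs]
  have e : d * d + 2 * x + 1 - d * d = 2 * x + 1 := by omega
  rw [e, if_neg (by omega), if_pos (by omega), show (2 * x + 1 - 1) / 2 = x by omega]

theorem pvCell_even (d x : Nat) (h : x < d) :
    pvCell (d * d + 2 * x + 2) = ((d : Int), (x : Int)) := by
  have hs : Nat.sqrt (d * d + 2 * x + 2) = d := pv_sqrt_between d _ (by omega) (by nlinarith)
  unfold pvCell
  rw [hs]
  have e : d * d + 2 * x + 2 - d * d = 2 * x + 2 := by omega
  rw [e, if_neg (by omega), if_neg (by omega), show (2 * x + 2) / 2 - 1 = x by omega]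

-- ===== A-side characterisation =====

theorem pvForA_spec (L : Int) (d : Nat) :
    ∀ (m x : Nat), x + m = d → (((d * d + 2 * x + 1 : Nat) : Int) < L) →
      ordering_cells_2_for L (d : Int) (PySem.List.pyRange (x : Int) (d : Int) 1)
        ((List.range (d * d + 2 * x + 1)).map pvCell) =
      if ((d * d + 2 * d + 1 : Nat) : Int) < L then
        .inr ((List.range (d * d + 2 * d + 1)).map pvCell)
      else .inl ((List.range L.toNat).map pvCell) := by
  intro m
  induction m with
  | zero =>
    intro x hx hlt
    have hxd : x = d := by omega
    subst hxd
    rw [PySem.List.pyRange_one_eq_nil (le_refl _)]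
    simp only [ordering_cells_2_for]
    rw [if_pos hlt]
  | succ m ih =>
    intro x hx hlt
    have hxd : x < d := by omega
    rw [PySem.List.pyRange_one_cons (by exact_mod_cast hxd)]
    simp only [ordering_cells_2_for]
    have e1 : (List.range (d * d + 2 * x + 1)).map pvCell ++ [((x : Int), (d : Int))] =
        (List.range (d * d + 2 * x + 2)).map pvCell := by
      conv_rhs => rw [show d * d + 2 * x + 2 = (d * d + 2 * x + 1) + 1 by omega, List.range_succ]
      rw [List.map_append, List.map_singleton, pvCell_odd d x hxd]
    rw [e1]
    by_cases hL1 : L ≤ (((List.range (d * d + 2 * x + 2)).map pvCell).length : Int)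
    · rw [if_pos hL1]
      simp only [List.length_map, List.length_range] at hL1
      rw [if_neg (by push_cast at hL1 hlt ⊢; omega)]
      rw [show L.toNat = d * d + 2 * x + 2 by push_cast at hL1 hlt; omega]
    · rw [if_neg hL1]
      simp only [List.length_map, List.length_range] at hL1
      have e2 : (List.range (d * d + 2 * x + 2)).map pvCell ++ [((d : Int), (x : Int))] =
          (List.range (d * d + 2 * x + 3)).map pvCell := by
        conv_rhs => rw [show d * d + 2 * x + 3 = (d * d + 2 * x + 2) + 1 by omega, List.range_succ]
        rw [List.map_append, List.map_singleton, pvCell_even d x hxd]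
      rw [e2]
      by_cases hL2 : L ≤ (((List.range (d * d + 2 * x + 3)).map pvCell).length : Int)
      · rw [if_pos hL2]
        simp only [List.length_map, List.length_range] at hL2
        rw [if_neg (by push_cast at hL2 ⊢; omega)]
        rw [show L.toNat = d * d + 2 * x + 3 by push_cast at hL2 hL1; omega]
      · rw [if_neg hL2]
        simp only [List.length_map, List.length_range] at hL2
        rw [show ((x : Int) + 1) = ((x + 1 : Nat) : Int) by push_cast; ring,
          show d * d + 2 * x + 3 = d * d + 2 * (x + 1) + 1 by omega]
        exact ih (x + 1) (by omega) (by push_cast; push_cast at hL2; omega)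

theorem pvGoA_spec (L : Int) :
    ∀ (fuel d : Nat), L.toNat - d ≤ fuel → (((d * d : Nat) : Int) < L) →
      ordering_cells_2_go fuel L ((List.range (d * d)).map pvCell) (d : Int) =
        (List.range L.toNat).map pvCell := by
  intro fuel
  induction fuel with
  | zero =>
    intro d hk hlt
    exfalso
    have h1 : d * d < L.toNat := by omega
    rcases Nat.eq_zero_or_pos d with h | h
    · subst h; simp at h1; omega
    · have := Nat.le_mul_of_pos_left d h; omega
  | succ fuel ih =>
    intro d hk hlt
    simp only [ordering_cells_2_go]
    rw [if_pos (by simpa using hlt)]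
    have e1 : (List.range (d * d)).map pvCell ++ [((d : Int), (d : Int))] =
        (List.range (d * d + 1)).map pvCell := by
      conv_rhs => rw [show d * d + 1 = (d * d) + 1 from rfl, List.range_succ]
      rw [List.map_append, List.map_singleton, pvCell_sq d]
    rw [e1]
    by_cases hL1 : L ≤ (((List.range (d * d + 1)).map pvCell).length : Int)
    · rw [if_pos hL1]
      simp only [List.length_map, List.length_range] at hL1
      rw [show L.toNat = d * d + 1 by push_cast at hL1 hlt; omega]
    · rw [if_neg hL1]
      simp only [List.length_map, List.length_range] at hL1
      have hfor := pvForA_spec L d d 0 (by omega)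
        (by push_cast; push_cast at hL1; omega)
      rw [show ((0 : Nat) : Int) = (0 : Int) by norm_num,
        show d * d + 2 * 0 + 1 = d * d + 1 by omega] at hfor
      have hexp : d * d + 2 * d + 1 = (d + 1) * (d + 1) := by ring
      by_cases hc : ((d * d + 2 * d + 1 : Nat) : Int) < L
      · rw [if_pos hc] at hfor
        rw [hfor]
        rw [show ((d : Int) + 1) = ((d + 1 : Nat) : Int) by push_cast; ring,
          show d * d + 2 * d + 1 = (d + 1) * (d + 1) from hexp]
        exact ih (d + 1) (by push_cast at hlt; omega) (by rw [← hexp]; exact hc)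
      · rw [if_neg hc] at hfor
        rw [hfor]

-- ===== B-side characterisation =====

-- B's running d tracks Nat.sqrt: entering index k it is sqrt (k-1), leaving it is sqrt k
theorem pv_sqrt_step (k : Nat) :
    Nat.sqrt k =
      if k = (Nat.sqrt (k - 1) + 1) * (Nat.sqrt (k - 1) + 1) then Nat.sqrt (k - 1) + 1
      else Nat.sqrt (k - 1) := by
  cases k with
  | zero => simp
  | succ j =>
    have hj1 := Nat.sqrt_le j
    have hj2 := Nat.lt_succ_sqrt j
    simp only [Nat.succ_eq_add_one] at hj2
    simp only [Nat.add_sub_cancel]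
    split_ifs with h
    · exact pv_sqrt_between _ _ (by omega) (by nlinarith)
    · exact pv_sqrt_between _ _ (by omega) (by omega)

theorem pvStepB_cell (acc : List (Int × Int)) (k : Nat) :
    ordering_cells_2_step (acc, (Nat.sqrt (k - 1) : Int)) (k : Int) =
      (acc ++ [pvCell k], (Nat.sqrt k : Int)) := by
  have hle := Nat.sqrt_le k
  have hd : (if (k : Int) = ((Nat.sqrt (k - 1) : Int) + 1) * ((Nat.sqrt (k - 1) : Int) + 1)
      then (Nat.sqrt (k - 1) : Int) + 1 else (Nat.sqrt (k - 1) : Int)) = (Nat.sqrt k : Int) := by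
    rw [pv_sqrt_step k]
    by_cases h : k = (Nat.sqrt (k - 1) + 1) * (Nat.sqrt (k - 1) + 1)
    · rw [if_pos (by exact_mod_cast h), if_pos h]
      push_cast; ring
    · rw [if_neg (fun hc => h (by exact_mod_cast hc)), if_neg h]
  simp only [ordering_cells_2_step]
  rw [hd]
  unfold pvCell
  have ho : (k : Int) - (Nat.sqrt k : Int) * (Nat.sqrt k : Int) =
      ((k - Nat.sqrt k * Nat.sqrt k : Nat) : Int) := by
    rw [Nat.cast_sub hle]; push_cast; ring
  rw [ho, PySem.Int.mod_eq_emod_of_pos (by norm_num),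
    PySem.Int.floordiv_eq_ediv_of_pos (by norm_num),
    PySem.Int.floordiv_eq_ediv_of_pos (by norm_num)]
  by_cases h0 : k - Nat.sqrt k * Nat.sqrt k = 0
  · rw [if_pos (by exact_mod_cast h0), if_pos h0]
  · rw [if_neg (by exact_mod_cast h0), if_neg h0]
    by_cases hp : (k - Nat.sqrt k * Nat.sqrt k) % 2 = 1
    · rw [if_pos (by omega), if_pos hp]
      simp only [Prod.mk.injEq, List.append_cancel_left_eq, List.cons.injEq, and_true]
      omega
    · rw [if_neg (by omega), if_neg hp]
      simp only [Prod.mk.injEq, List.append_cancel_left_eq, List.cons.injEq, and_true]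
      obtain ⟨q, hq⟩ : ∃ q, k - Nat.sqrt k * Nat.sqrt k = 2 * q :=
        ⟨(k - Nat.sqrt k * Nat.sqrt k) / 2, by omega⟩
      rw [hq, Nat.mul_div_cancel_left q (by norm_num)]
      have hq1 : 1 ≤ q := by omega
      push_cast [hq1]
      exact ⟨trivial, by omega⟩

theorem pvFoldB_spec (n : Nat) :
    ∀ (m k : Nat) (acc : List (Int × Int)), k + m = n →
      (PySem.List.pyRange (k : Int) (n : Int) 1).foldl ordering_cells_2_step
          (acc, (Nat.sqrt (k - 1) : Int)) =
        (acc ++ (List.range' k m).map pvCell, (Nat.sqrt (n - 1) : Int)) := by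
  intro m
  induction m with
  | zero =>
    intro k acc hk
    subst hk
    rw [PySem.List.pyRange_one_eq_nil (by push_cast; omega)]
    simp
  | succ m ih =>
    intro k acc hk
    rw [PySem.List.pyRange_one_cons (by exact_mod_cast (by omega : k < n))]
    simp only [List.foldl_cons, pvStepB_cell acc k]
    rw [show (Nat.sqrt k : Int) = (Nat.sqrt ((k + 1) - 1) : Int) by simp,
      show ((k : Int) + 1) = ((k + 1 : Nat) : Int) by push_cast; ring,
      ih (k + 1) (acc ++ [pvCell k]) (by omega)]
    rw [List.range'_succ, List.map_cons]
    simp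

-- ===== assembling the verdict =====

theorem pvA_closed (L : Int) : ordering_cells_2 L = (List.range L.toNat).map pvCell := by
  by_cases hL : L ≤ 0
  · rw [show L.toNat = 0 by omega]
    unfold ordering_cells_2
    rw [show L.toNat = 0 by omega]
    simp [ordering_cells_2_go]
  · have h0 : ((0 : Nat) : Int) = (0 : Int) := by norm_num
    have := pvGoA_spec L L.toNat 0 (by omega)
      (by rw [show ((0 * 0 : Nat) : Int) = (0 : Int) by norm_num]; omega)
    rw [show (0 : Nat) * 0 = 0 from rfl, List.range_zero, List.map_nil, h0] at this
    exact this

theorem pvB_closed (L : Int) : ordering_cells_2_alt L = (List.range L.toNat).map pvCell := by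
  by_cases hL : L ≤ 0
  · rw [show L.toNat = 0 by omega]
    simp [ordering_cells_2_alt, hL]
  · rw [ordering_cells_2_alt, if_neg hL]
    have hfold := pvFoldB_spec L.toNat L.toNat 0 [] (by omega)
    rw [show ((0 : Nat) : Int) = (0 : Int) by norm_num,
      show ((L.toNat : Nat) : Int) = L by omega,
      show ((Nat.sqrt (0 - 1) : Nat) : Int) = (0 : Int) by simp] at hfold
    rw [hfold]
    simp [List.range_eq_range']

-- ===== VERDICT (by name: the statement is the Claim_ definition above) =====
theorem ordering_cells_2_spec : Claim_equal_ordering_cells_2 := by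
  intro L _
  unfold Spec_ordering_cells_2
  rw [pvA_closed, pvB_closed]
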